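-- pv_equiv track=rewrite | github.com/dotaku1992/Algorithm | Programmers/나머지가 1이 되는 수 찾기.py | solution
-- ===== SOURCE A (Python) =====
-- def solution(n):
--     isPrime = [0,0,1,1] + [1]*(1000001-4)
--     for num in range(int(1000000*0.5)):
--         if isPrime[num]:
--             for mul in range(2,1000000//num+1):
--                 isPrime[num*mul]=0
--
--     sosu = [num for num,isp in enumerate(isPrime) if isp]
--
--     answer = 0
--     for div in sosu:
--         if n%div==1:
--             answer = div
--             break
--
--     return answer
-- ===== SOURCE B (Python) =====
-- def solution(n):
--     return next((d for d in range(2, 1000001) if n % d == 1), 0)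
-- ===== Notes on version B (the rewrite author's own statement) =====
-- stated objective: faster
-- what changed: A builds a full million-entry sieve of Eratosthenes on every call and then scans the resulting prime list for the first prime leaving remainder one when dividing n; B simply scans candidate divisors upward and returns the first divisor leaving that remainder (the smallest such divisor, which divides n minus one, is automatically prime), stopping early and needing no sieve.
import Mathlib
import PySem

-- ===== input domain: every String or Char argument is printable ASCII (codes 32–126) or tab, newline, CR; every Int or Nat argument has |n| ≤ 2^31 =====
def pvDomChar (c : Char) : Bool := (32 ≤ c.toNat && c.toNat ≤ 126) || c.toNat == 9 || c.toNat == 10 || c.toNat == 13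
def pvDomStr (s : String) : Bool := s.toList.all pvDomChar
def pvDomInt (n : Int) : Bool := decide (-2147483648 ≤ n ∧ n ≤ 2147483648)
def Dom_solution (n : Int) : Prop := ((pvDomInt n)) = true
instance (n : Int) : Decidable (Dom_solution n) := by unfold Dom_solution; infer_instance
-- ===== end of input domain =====

-- B replaces A's full 10^6 sieve of Eratosthenes by a direct scan for the first divisor
-- d ≥ 2 of n-1 (the first such divisor is automatically prime), for a large measured speed-up.

-- ===== PORT A =====
-- isPrime = [0,0,1,1] + [1]*(1000001-4)
def pvInit : Array Int := #[0, 0, 1, 1] ++ Array.replicate (1000001 - 4) 1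

-- inner loop: for mul in range(2, 1000000//num+1): isPrime[num*mul] = 0
-- (range bounds are nonnegative, so the Nat range' is exact; List.range' 2 c lists 2,…,c+1.
--  Python's 1000000//num would raise for num = 0, but that line is unreachable: isPrime[0]
--  is 0 initially and the sieve only ever writes 0, and likewise here the guard is false.)
def pvMark (num : Nat) (arr : Array Int) : Array Int :=
  (List.range' 2 (1000000 / num + 1 - 2)).foldl (fun a mul => a.set! (num * mul) 0) arr

-- one iteration of: for num in range(int(1000000*0.5)): if isPrime[num]: …
def pvStep (arr : Array Int) (num : Nat) : Array Int :=
  if arr[num]! != 0 then pvMark num arr else arr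

-- int(1000000*0.5) = 500000 exactly
def pvSieve : Array Int := (List.range 500000).foldl pvStep pvInit

-- sosu = [num for num,isp in enumerate(isPrime) if isp]
-- (zipIdx is enumerate with the pair swapped: num = p.2 cast to Int, isp = p.1;
--  the PySem enumerate is not stack-safe in the evaluator on a 10^6-element list)
def pvSosu : List Int :=
  (pvSieve.toList.zipIdx).filterMap
    (fun p => if p.1 != 0 then some ((p.2 : Nat) : Int) else none)

-- answer loop with break
def pvFindA (n : Int) : List Int → Int
  | [] => 0
  | d :: ds => if PySem.Int.mod n d == 1 then d else pvFindA n ds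

def solution (n : Int) : Int := pvFindA n pvSosu

-- ===== PORT B =====
-- next((d for d in range(2, 1000001) if n % d == 1), 0)
def solution_alt (n : Int) : Int :=
  match (PySem.List.pyRange 2 1000001 1).find? (fun d => PySem.Int.mod n d == 1) with
  | some d => d
  | none => 0

-- ===== PRECONDITION & SPEC =====
def Spec_solution (n : Int) (out : Int) : Prop := out = solution_alt n
instance (n : Int) (out : Int) : Decidable (Spec_solution n out) := by unfold Spec_solution; infer_instance

-- ===== CLAIM (what is proved, stated in full; the proofs are below) =====
def Claim_equal_solution : Prop := ∀ (n : Int), Dom_solution n → Spec_solution n (solution n)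

-- ===== LEMMAS AND PROOFS =====

theorem pvGetBang (a : Array Int) (j : Nat) : a[j]! = a[j]?.getD 0 := by
  rw [Array.getElem!_eq_getD, Array.getD_eq_getD_getElem?]; rfl

-- a write of 0 leaves any cell either 0 or unchanged
theorem pvSet0_cases (a : Array Int) (i j : Nat) :
    (a.set! i 0)[j]? = some 0 ∨ (a.set! i 0)[j]? = a[j]? := by
  rw [Array.set!_eq_setIfInBounds, Array.getElem?_setIfInBounds]
  split_ifs with h1 h2
  · exact Or.inl rfl
  · right
    subst h1
    exact (Array.getElem?_eq_none (by omega)).symm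
  · exact Or.inr rfl

theorem pvMark_cases (l : List Nat) (num : Nat) (arr : Array Int) (j : Nat) :
    (l.foldl (fun a mul => a.set! (num * mul) 0) arr)[j]? = some 0 ∨
    (l.foldl (fun a mul => a.set! (num * mul) 0) arr)[j]? = arr[j]? := by
  induction l generalizing arr with
  | nil => exact Or.inr rfl
  | cons m t ih =>
    simp only [List.foldl_cons]
    rcases ih (arr.set! (num * m) 0) with h | h
    · exact Or.inl h
    · rw [h]; exact pvSet0_cases arr (num * m) j

theorem pvStep_cases (arr : Array Int) (num : Nat) (j : Nat) :
    (pvStep arr num)[j]? = some 0 ∨ (pvStep arr num)[j]? = arr[j]? := by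
  unfold pvStep
  split
  · exact pvMark_cases _ num arr j
  · exact Or.inr rfl

theorem pvSieveLoop_cases (l : List Nat) (arr : Array Int) (j : Nat) :
    (l.foldl pvStep arr)[j]? = some 0 ∨ (l.foldl pvStep arr)[j]? = arr[j]? := by
  induction l generalizing arr with
  | nil => exact Or.inr rfl
  | cons m t ih =>
    simp only [List.foldl_cons]
    rcases ih (pvStep arr m) with h | h
    · exact Or.inl h
    · rw [h]; exact pvStep_cases arr m j

theorem pvSieve_cases (j : Nat) : pvSieve[j]? = some 0 ∨ pvSieve[j]? = pvInit[j]? :=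
  pvSieveLoop_cases _ pvInit j

theorem pvInit_size : pvInit.size = 1000001 := by
  simp [pvInit]

theorem pvInit_get_le_one (j : Nat) (h : j ≤ 1) : pvInit[j]? = some 0 := by
  unfold pvInit
  rw [Array.getElem?_append_left (by simp; omega)]
  interval_cases j <;> decide

theorem pvInit_get_ge_two (j : Nat) (h2 : 2 ≤ j) (h : j ≤ 1000000) : pvInit[j]? = some 1 := by
  unfold pvInit
  by_cases h4 : j < 4
  · rw [Array.getElem?_append_left (by simpa using h4)]
    interval_cases j
    · decide
    · decide
  · rw [Array.getElem?_append_right (by simpa using h4), Array.getElem?_replicate,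
      if_pos (by simp; omega)]

-- cells 0 and 1 stay 0, and a cell with no factorization a*b (a,b ≥ 2) stays 1
theorem pvMark_inv (p num : Nat) (hnum : 2 ≤ num)
    (hnf : ∀ a b : Nat, 2 ≤ a → 2 ≤ b → a * b ≠ p)
    (l : List Nat) (hl : ∀ m ∈ l, 2 ≤ m) (arr : Array Int)
    (h0 : arr[0]? = some 0) (h1 : arr[1]? = some 0) (hp : arr[p]? = some 1) :
    (l.foldl (fun a mul => a.set! (num * mul) 0) arr)[0]? = some 0 ∧
    (l.foldl (fun a mul => a.set! (num * mul) 0) arr)[1]? = some 0 ∧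
    (l.foldl (fun a mul => a.set! (num * mul) 0) arr)[p]? = some 1 := by
  induction l generalizing arr with
  | nil => exact ⟨h0, h1, hp⟩
  | cons m t ih =>
    have hm : 2 ≤ m := hl m (by simp)
    have hunch : ∀ j : Nat, j ≠ num * m → (arr.set! (num * m) 0)[j]? = arr[j]? := by
      intro j hj
      rw [Array.set!_eq_setIfInBounds, Array.getElem?_setIfInBounds, if_neg (fun h => hj h.symm)]
    simp only [List.foldl_cons]
    refine ih (fun x hx => hl x (by simp [hx])) (arr.set! (num * m) 0) ?_ ?_ ?_
    · rw [hunch 0 (by nlinarith)]; exact h0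
    · rw [hunch 1 (by nlinarith)]; exact h1
    · rw [hunch p (fun h => hnf num m hnum hm h.symm)]; exact hp

theorem pvStep_inv (p num : Nat)
    (hnf : ∀ a b : Nat, 2 ≤ a → 2 ≤ b → a * b ≠ p) (arr : Array Int)
    (h0 : arr[0]? = some 0) (h1 : arr[1]? = some 0) (hp : arr[p]? = some 1) :
    (pvStep arr num)[0]? = some 0 ∧ (pvStep arr num)[1]? = some 0 ∧
    (pvStep arr num)[p]? = some 1 := by
  unfold pvStep
  split
  · rename_i hg
    have hnum : 2 ≤ num := by
      rcases Nat.lt_or_ge num 2 with hlt | hge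
      · exfalso
        interval_cases num <;> simp [pvGetBang, h0, h1] at hg
      · exact hge
    exact pvMark_inv p num hnum hnf _ (fun m hm => (List.mem_range'_1.mp hm).1) arr h0 h1 hp
  · exact ⟨h0, h1, hp⟩

theorem pvSieveLoop_inv (p : Nat) (hnf : ∀ a b : Nat, 2 ≤ a → 2 ≤ b → a * b ≠ p)
    (l : List Nat) (arr : Array Int)
    (h0 : arr[0]? = some 0) (h1 : arr[1]? = some 0) (hp : arr[p]? = some 1) :
    (l.foldl pvStep arr)[0]? = some 0 ∧ (l.foldl pvStep arr)[1]? = some 0 ∧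
    (l.foldl pvStep arr)[p]? = some 1 := by
  induction l generalizing arr with
  | nil => exact ⟨h0, h1, hp⟩
  | cons m t ih =>
    obtain ⟨a0, a1, ap⟩ := pvStep_inv p m hnf arr h0 h1 hp
    simpa only [List.foldl_cons] using ih (pvStep arr m) a0 a1 ap

theorem pvSieve_of_nofactor (p : Nat) (hp2 : 2 ≤ p) (hple : p ≤ 1000000)
    (hnf : ∀ a b : Nat, 2 ≤ a → 2 ≤ b → a * b ≠ p) : pvSieve[p]? = some 1 :=
  (pvSieveLoop_inv p hnf (List.range 500000) pvInit
    (pvInit_get_le_one 0 (by omega)) (pvInit_get_le_one 1 (by omega))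
    (pvInit_get_ge_two p hp2 hple)).2.2

-- one comprehension step
theorem pvAux_cons (a : Int) (t : List Int) (s : Nat) :
    ((a :: t).zipIdx s).filterMap
        (fun p => if p.1 != 0 then some ((p.2 : Nat) : Int) else none) =
    (if a = 0 then [] else [((s : Nat) : Int)]) ++
      (t.zipIdx (s + 1)).filterMap
        (fun p => if p.1 != 0 then some ((p.2 : Nat) : Int) else none) := by
  rw [List.zipIdx_cons]
  by_cases ha : a = 0 <;> simp [ha]

-- characterisation of the list comprehension over enumerate
theorem pvMem_sosuAux (l : List Int) : ∀ (s : Nat) (x : Int),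
    (x ∈ (l.zipIdx s).filterMap
        (fun p => if p.1 != 0 then some ((p.2 : Nat) : Int) else none)) ↔
    ∃ j : Nat, x = ((s + j : Nat) : Int) ∧ ∃ v, l[j]? = some v ∧ v ≠ 0 := by
  induction l with
  | nil => intro s x; simp
  | cons a t ih =>
    intro s x
    rw [pvAux_cons]
    by_cases ha : a = 0
    · rw [if_pos ha, List.nil_append, ih (s + 1) x]
      constructor
      · rintro ⟨j, hx, v, hv, hv0⟩
        exact ⟨j + 1, by push_cast; omega, v, by simpa using hv, hv0⟩
      · rintro ⟨j, hx, v, hv, hv0⟩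
        match j with
        | 0 => simp_all
        | j + 1 => exact ⟨j, by push_cast at hx ⊢; omega, v, by simpa using hv, hv0⟩
    · rw [if_neg ha, List.singleton_append, List.mem_cons, ih (s + 1) x]
      constructor
      · rintro (rfl | ⟨j, hx, v, hv, hv0⟩)
        · exact ⟨0, by simp, a, by simp, ha⟩
        · exact ⟨j + 1, by push_cast; omega, v, by simpa using hv, hv0⟩
      · rintro ⟨j, hx, v, hv, hv0⟩
        match j with
        | 0 =>
          left
          simp only [List.getElem?_cons_zero, Option.some.injEq] at hv
          omega
        | j + 1 => exact Or.inr ⟨j, by push_cast at hx ⊢; omega, v, by simpa using hv, hv0⟩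

theorem pvMem_pvSosu (x : Int) :
    x ∈ pvSosu ↔ ∃ j : Nat, x = (j : Int) ∧ ∃ v, pvSieve[j]? = some v ∧ v ≠ 0 := by
  unfold pvSosu
  rw [pvMem_sosuAux]
  simp [Array.getElem?_toList]

theorem pvMark_size (l : List Nat) (num : Nat) (arr : Array Int) :
    (l.foldl (fun a mul => a.set! (num * mul) 0) arr).size = arr.size := by
  induction l generalizing arr with
  | nil => rfl
  | cons u t ih =>
    rw [List.foldl_cons, ih]
    simp [Array.set!_eq_setIfInBounds]

theorem pvStep_size (arr : Array Int) (num : Nat) : (pvStep arr num).size = arr.size := by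
  unfold pvStep
  split
  · exact pvMark_size _ num arr
  · rfl

theorem pvSieve_size : pvSieve.size = 1000001 := by
  have loop : ∀ (l : List Nat) (arr : Array Int), (l.foldl pvStep arr).size = arr.size := by
    intro l
    induction l with
    | nil => intro arr; rfl
    | cons m t ih =>
      intro arr
      rw [List.foldl_cons, ih, pvStep_size]
  rw [pvSieve, loop, pvInit_size]

theorem pvMem_pvSosu_bounds (x : Int) (hx : x ∈ pvSosu) : 2 ≤ x ∧ x ≤ 1000000 := by
  obtain ⟨j, rfl, v, hv, hv0⟩ := (pvMem_pvSosu _).mp hx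
  have hjlt : j < 1000001 := by
    have := (Array.getElem?_eq_some_iff.mp hv).1
    rwa [pvSieve_size] at this
  have hj2 : 2 ≤ j := by
    rcases pvSieve_cases j with hc | hc
    · rw [hc] at hv
      exact absurd (Option.some.inj hv).symm hv0
    · by_contra hlt
      rw [hc, pvInit_get_le_one j (by omega)] at hv
      exact hv0 (Option.some.inj hv).symm
  exact ⟨by exact_mod_cast hj2, by exact_mod_cast Nat.le_of_lt_succ hjlt⟩

-- lower bound: every element of the comprehension is ≥ its start
theorem pvSosuAux_lb (l : List Int) : ∀ (s : Nat) (x : Int),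
    x ∈ (l.zipIdx s).filterMap
        (fun p => if p.1 != 0 then some ((p.2 : Nat) : Int) else none) → (s : Int) ≤ x := by
  intro s x hx
  obtain ⟨j, rfl, -⟩ := (pvMem_sosuAux l s x).mp hx
  push_cast
  omega

theorem pvSosuAux_pairwise (l : List Int) : ∀ (s : Nat),
    ((l.zipIdx s).filterMap
        (fun p => if p.1 != 0 then some ((p.2 : Nat) : Int) else none)).Pairwise (· < ·) := by
  induction l with
  | nil => intro s; simp
  | cons a t ih =>
    intro s
    rw [pvAux_cons]
    by_cases ha : a = 0
    · simpa [ha] using ih (s + 1)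
    · rw [if_neg ha, List.singleton_append]
      exact List.pairwise_cons.mpr
        ⟨fun x hx => by have := pvSosuAux_lb t (s + 1) x hx; push_cast at this ⊢; omega,
         ih (s + 1)⟩

theorem pvSosu_pairwise : pvSosu.Pairwise (· < ·) := pvSosuAux_pairwise _ 0

-- find? on a strictly increasing list: everything smaller than the result fails
theorem pvFind?_min (q : Int → Bool) (L : List Int) (hL : L.Pairwise (· < ·)) (d : Int)
    (h : L.find? q = some d) : ∀ e ∈ L, e < d → q e = false := by
  induction L with
  | nil => simp
  | cons a t ih =>
    rw [List.find?_cons] at h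
    intro e he hed
    rcases List.pairwise_cons.mp hL with ⟨hat, ht⟩
    split at h
    · cases h
      rcases List.mem_cons.mp he with rfl | het
      · omega
      · exact absurd (hat e het) (by omega)
    · rename_i hqa
      rcases List.mem_cons.mp he with rfl | het
      · exact Bool.not_eq_true _ ▸ hqa
      · exact ih ht h e het hed

theorem pvFindA_eq_zero (n : Int) (L : List Int)
    (h : ∀ e ∈ L, (PySem.Int.mod n e == 1) = false) : pvFindA n L = 0 := by
  induction L with
  | nil => rfl
  | cons a t ih =>
    rw [pvFindA, h a (by simp), if_neg (by simp)]
    exact ih fun e he => h e (by simp [he])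

theorem pvFindA_eq (n : Int) (L : List Int) (hL : L.Pairwise (· < ·)) (d : Int)
    (hd : d ∈ L) (hq : (PySem.Int.mod n d == 1) = true)
    (hmin : ∀ e ∈ L, e < d → (PySem.Int.mod n e == 1) = false) : pvFindA n L = d := by
  induction L with
  | nil => simp at hd
  | cons a t ih =>
    rcases List.pairwise_cons.mp hL with ⟨hat, ht⟩
    by_cases hqa : (PySem.Int.mod n a == 1) = true
    · have had : a = d := by
        rcases List.mem_cons.mp hd with rfl | hdt
        · rfl
        · have := hmin a (by simp) (hat d hdt)
          simp [this] at hqa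
      rw [pvFindA, if_pos hqa, had]
    · have hdt : d ∈ t := by
        rcases List.mem_cons.mp hd with rfl | hdt
        · exact absurd hq hqa
        · exact hdt
      rw [pvFindA, if_neg hqa]
      exact ih ht hdt fun e he => hmin e (by simp [he])

-- n % d == 1 is divisibility of n - 1, for d ≥ 2
theorem pvModOne (n d : Int) (h2 : 2 ≤ d) : PySem.Int.mod n d = 1 ↔ d ∣ (n - 1) := by
  rw [PySem.Int.mod_eq_emod_of_pos (by omega)]
  constructor
  · intro h
    exact ⟨n / d, by have := Int.emod_add_mul_ediv n d; omega⟩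
  · rintro ⟨k, hk⟩
    have h1 : n = 1 + d * k := by omega
    rw [h1, Int.add_mul_emod_self_left]
    exact Int.emod_eq_of_lt (by omega) (by omega)

theorem pvMain (n : Int) : solution n = solution_alt n := by
  rcases Option.eq_none_or_eq_some
      ((PySem.List.pyRange 2 1000001 1).find? (fun d => PySem.Int.mod n d == 1)) with
    hfind | ⟨d, hfind⟩
  · unfold solution solution_alt
    rw [hfind]
    show pvFindA n pvSosu = 0
    rw [List.find?_eq_none] at hfind
    exact pvFindA_eq_zero n pvSosu fun e he => by
      have hb := pvMem_pvSosu_bounds e he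
      have := hfind e (PySem.List.mem_pyRange_one.mpr ⟨hb.1, by omega⟩)
      simpa using this
  · unfold solution solution_alt
    rw [hfind]
    show pvFindA n pvSosu = d
    have hq := List.find?_some hfind
    have hd := List.mem_of_find?_eq_some hfind
    rw [PySem.List.mem_pyRange_one] at hd
    have hmin := pvFind?_min _ _ (PySem.List.pairwise_lt_pyRange_one 2 1000001) d hfind
    have hmin' : ∀ e : Int, 2 ≤ e → e < d → (PySem.Int.mod n e == 1) = false :=
      fun e h2 hlt => hmin e (PySem.List.mem_pyRange_one.mpr ⟨h2, by omega⟩) hlt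
    have hdvd : d ∣ n - 1 := (pvModOne n d hd.1).mp (by simpa using hq)
    have hnf : ∀ a b : Nat, 2 ≤ a → 2 ≤ b → a * b ≠ d.toNat := by
      intro a b ha hb hab
      have hd' : (a : Int) * (b : Int) = d := by
        have h1 : ((a * b : Nat) : Int) = ((d.toNat : Nat) : Int) := by exact_mod_cast hab
        push_cast at h1
        omega
      have hax : (2 : Int) ≤ (a : Int) := by exact_mod_cast ha
      have hbx : (2 : Int) ≤ (b : Int) := by exact_mod_cast hb
      have hqa : PySem.Int.mod n a = 1 :=
        (pvModOne n a hax).mpr (dvd_trans ⟨b, hd'.symm⟩ hdvd)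
      have hlt : (a : Int) < d := by nlinarith
      have := hmin' a hax hlt
      simp [hqa] at this
    have hsieve := pvSieve_of_nofactor d.toNat (by omega) (by omega) hnf
    have hmem : d ∈ pvSosu := (pvMem_pvSosu d).mpr ⟨d.toNat, by omega, 1, hsieve, one_ne_zero⟩
    exact pvFindA_eq n pvSosu pvSosu_pairwise d hmem hq fun e he hlt =>
      hmin' e (pvMem_pvSosu_bounds e he).1 hlt

-- ===== VERDICT (by name: the statement is the Claim_ definition above) =====
theorem solution_spec : Claim_equal_solution := by
  intro n _
  exact pvMain n
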